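-- pv_equiv track=rewrite | github.com/alejandrogonzalvo/qusim | python/quadris/dse/topology.py | idle_reserved_qubits
-- ===== SOURCE A (Python) =====
-- import math
--
-- def inter_core_neighbors(num_cores: int, inter_topology: str) -> list[list[int]]:
--     """Per-core list of unique neighbouring core indices."""
--     if num_cores < 2:
--         return [[] for _ in range(num_cores)]
--     nbrs: list[list[int]] = [[] for _ in range(num_cores)]
--     inter = (inter_topology or "ring").lower()
--     if inter == "ring":
--         for c in range(num_cores):
--             nbrs[c].append((c + 1) % num_cores)
--             if num_cores > 2:
--                 nbrs[c].append((c - 1) % num_cores)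
--     elif inter == "linear":
--         for c in range(num_cores):
--             if c + 1 < num_cores:
--                 nbrs[c].append(c + 1)
--             if c - 1 >= 0:
--                 nbrs[c].append(c - 1)
--     elif inter == "all_to_all":
--         for c in range(num_cores):
--             for c2 in range(num_cores):
--                 if c2 != c:
--                     nbrs[c].append(c2)
--     elif inter == "grid":
--         side = math.ceil(math.sqrt(num_cores))
--         for c in range(num_cores):
--             row, col = divmod(c, side)
--             if col + 1 < side and c + 1 < num_cores:
--                 nbrs[c].append(c + 1)
--             if col > 0 and c - 1 >= 0:
--                 nbrs[c].append(c - 1)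
--             if c + side < num_cores:
--                 nbrs[c].append(c + side)
--             if c - side >= 0:
--                 nbrs[c].append(c - side)
--     else:
--         for c in range(num_cores):
--             nbrs[c].append((c + 1) % num_cores)
--             if num_cores > 2:
--                 nbrs[c].append((c - 1) % num_cores)
--     return [sorted(set(n)) for n in nbrs]
--
-- def core_groups_for(num_cores: int, inter_topology: str) -> list[list[int]]:
--     """Per-core *ordered* list of partner cores — one entry per inter-core link."""
--     return inter_core_neighbors(num_cores, inter_topology)
--
-- def num_comm_groups(num_cores: int, inter_topology: str) -> list[int]:
--     """Number of comm-qubit groups per core (= number of inter-core neighbours)."""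
--     return [len(g) for g in core_groups_for(num_cores, inter_topology)]
--
-- def g_max(num_cores: int, inter_topology: str) -> int:
--     """Worst-case neighbour count across the chip — drives uniform reservation.
--
--     Every core in the device reserves ``G_max · (K + B)`` slots regardless
--     of its actual ``G(c)``.  Corner/edge cores in grid or linear
--     topologies therefore carry idle comm slots, but every core has the
--     same data capacity ``qpc − G_max · (K+B)``.
--
--     nc=1 returns 0 (no inter-core links exist).
--     """
--     if num_cores < 2:
--         return 0
--     return max(len(n) for n in inter_core_neighbors(num_cores, inter_topology))
--
-- def idle_reserved_qubits(
--     num_cores: int,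
--     communication_qubits: int,
--     buffer_qubits: int,
--     inter_topology: str,
-- ) -> int:
--     """Sum of unused comm slots across the chip.
--
--     A core with ``G(c) < G_max`` reserves ``G_max·(K+B)`` slots but only
--     uses ``G(c)·(K+B)`` of them — the difference is idle hardware.
--     """
--     if num_cores < 2:
--         return 0
--     g_active = num_comm_groups(num_cores, inter_topology)
--     Gm = g_max(num_cores, inter_topology)
--     K = max(0, int(communication_qubits))
--     B = max(0, int(buffer_qubits))
--     return sum((Gm - g) * (K + B) for g in g_active)
-- ===== SOURCE B (Python) =====
-- import math
--
-- def idle_reserved_qubits(num_cores, communication_qubits, buffer_qubits, inter_topology):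
--     if num_cores < 2:
--         return 0
--     slot = max(0, int(communication_qubits)) + max(0, int(buffer_qubits))
--     t = (inter_topology or "ring").lower()
--     if t == "linear":
--         # endpoints have degree 1, interior cores degree 2; regular when nc == 2
--         return 2 * slot if num_cores > 2 else 0
--     if t == "grid":
--         side = math.isqrt(num_cores - 1) + 1  # = ceil(sqrt(num_cores)) for num_cores >= 2
--         total = 0
--         gmax = 0
--         for c in range(num_cores):
--             col = c % side
--             d = ((1 if col + 1 < side and c + 1 < num_cores else 0)
--                  + (1 if col > 0 else 0)
--                  + (1 if c + side < num_cores else 0)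
--                  + (1 if c - side >= 0 else 0))
--             total += d
--             if d > gmax:
--                 gmax = d
--         return (gmax * num_cores - total) * slot
--     # ring, all_to_all and unknown topologies (treated as ring) are regular graphs: no idle slots
--     return 0
-- ===== Notes on version B (the rewrite author's own statement) =====
-- stated objective: faster
-- what changed: B never builds neighbour lists: it returns 0 directly for the regular topologies (ring, all_to_all, unknown), a closed form 2*(K+B) for linear with more than two cores, and for grid computes each core's degree arithmetically in one O(1)-per-core pass accumulating sum and max, instead of A's per-core lists deduplicated and sorted and then scanned twice.
import Mathlib
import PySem

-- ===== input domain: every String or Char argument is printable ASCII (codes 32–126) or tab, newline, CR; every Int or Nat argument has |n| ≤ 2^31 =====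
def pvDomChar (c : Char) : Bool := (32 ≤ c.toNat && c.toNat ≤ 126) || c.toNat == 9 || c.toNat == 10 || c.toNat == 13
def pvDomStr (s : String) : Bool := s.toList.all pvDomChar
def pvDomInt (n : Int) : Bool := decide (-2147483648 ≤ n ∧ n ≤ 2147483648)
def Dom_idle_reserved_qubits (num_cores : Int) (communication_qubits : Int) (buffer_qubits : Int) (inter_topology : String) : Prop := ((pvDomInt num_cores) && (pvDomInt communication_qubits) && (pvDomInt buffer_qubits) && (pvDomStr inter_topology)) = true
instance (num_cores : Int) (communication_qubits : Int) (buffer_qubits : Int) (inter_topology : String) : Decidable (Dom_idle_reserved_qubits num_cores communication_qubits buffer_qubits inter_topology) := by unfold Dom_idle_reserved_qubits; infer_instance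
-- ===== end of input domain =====

-- B replaces A's build-sort-and-scan of per-core neighbour lists by closed forms for the
-- regular topologies and a single arithmetic pass for grid (objective: faster).


-- ===== PORT A =====
-- In every branch of A's loop, iteration c appends only to nbrs[c], so the mutated
-- nbrs array is exactly the per-core list built by this body, mapped over range(num_cores).
-- math.ceil(math.sqrt(num_cores)) is ported as Nat.sqrt (num_cores - 1) + 1, which is exact
-- for 2 ≤ num_cores ≤ 2^31 (the float sqrt is correctly rounded there, so the float ceil
-- agrees with the exact ceiling); the 'row' component of divmod is computed and unused in A.
def pvRawA (num_cores : Int) (inter : String) (c : Int) : List Int :=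
  if inter = "ring" then
    [PySem.Int.mod (c + 1) num_cores] ++
      (if num_cores > 2 then [PySem.Int.mod (c - 1) num_cores] else [])
  else if inter = "linear" then
    (if c + 1 < num_cores then [c + 1] else []) ++ (if c - 1 ≥ 0 then [c - 1] else [])
  else if inter = "all_to_all" then
    (PySem.List.pyRange 0 num_cores 1).foldl (fun l c2 => if c2 ≠ c then l ++ [c2] else l) []
  else if inter = "grid" then
    let side : Int := ((num_cores - 1).toNat.sqrt : Int) + 1
    let col : Int := PySem.Int.mod c side
    (if col + 1 < side ∧ c + 1 < num_cores then [c + 1] else []) ++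
    (if col > 0 ∧ c - 1 ≥ 0 then [c - 1] else []) ++
    (if c + side < num_cores then [c + side] else []) ++
    (if c - side ≥ 0 then [c - side] else [])
  else
    [PySem.Int.mod (c + 1) num_cores] ++
      (if num_cores > 2 then [PySem.Int.mod (c - 1) num_cores] else [])

def pvInterCoreNeighbors (num_cores : Int) (inter_topology : String) : List (List Int) :=
  if num_cores < 2 then (PySem.List.pyRange 0 num_cores 1).map (fun _ => ([] : List Int))
  else
    let inter := PySem.Str.lower (if inter_topology = "" then "ring" else inter_topology)
    ((PySem.List.pyRange 0 num_cores 1).map (fun c => pvRawA num_cores inter c)).map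
      (fun n => PySem.List.sorted (PySem.Set.ofList n) (fun x => x) false)

def pvCoreGroupsFor (num_cores : Int) (inter_topology : String) : List (List Int) :=
  pvInterCoreNeighbors num_cores inter_topology

def pvNumCommGroups (num_cores : Int) (inter_topology : String) : List Int :=
  (pvCoreGroupsFor num_cores inter_topology).map (fun g => (g.length : Int))

-- Python's max(...) raises only on an empty iterable; g_max guards num_cores < 2 first,
-- so the list is nonempty and the getD 0 default is never taken.
def pvGMax (num_cores : Int) (inter_topology : String) : Int :=
  if num_cores < 2 then 0
  else (PySem.List.max? ((pvInterCoreNeighbors num_cores inter_topology).map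
          (fun n => (n.length : Int))) (fun x => x)).getD 0

def idle_reserved_qubits (num_cores : Int) (communication_qubits : Int) (buffer_qubits : Int) (inter_topology : String) : Int :=
  if num_cores < 2 then 0
  else
    let g_active := pvNumCommGroups num_cores inter_topology
    let Gm := pvGMax num_cores inter_topology
    let K := max 0 communication_qubits
    let B := max 0 buffer_qubits
    (g_active.map (fun g => (Gm - g) * (K + B))).sum

-- ===== PORT B =====
def idle_reserved_qubits_alt (num_cores : Int) (communication_qubits : Int) (buffer_qubits : Int) (inter_topology : String) : Int :=
  if num_cores < 2 then 0
  else
    let slot := max 0 communication_qubits + max 0 buffer_qubits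
    let t := PySem.Str.lower (if inter_topology = "" then "ring" else inter_topology)
    if t = "linear" then (if num_cores > 2 then 2 * slot else 0)
    else if t = "grid" then
      -- side = math.isqrt(num_cores - 1) + 1
      let side : Int := ((num_cores - 1).toNat.sqrt : Int) + 1
      let p := (PySem.List.pyRange 0 num_cores 1).foldl (fun (p : Int × Int) c =>
        let col := PySem.Int.mod c side
        let d : Int := (if col + 1 < side ∧ c + 1 < num_cores then 1 else 0)
                     + (if col > 0 then 1 else 0)
                     + (if c + side < num_cores then 1 else 0)
                     + (if c - side ≥ 0 then 1 else 0)
        (p.1 + d, if d > p.2 then d else p.2)) (0, 0)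
      (p.2 * num_cores - p.1) * slot
    else 0

-- ===== PRECONDITION & SPEC =====
def Spec_idle_reserved_qubits (num_cores : Int) (communication_qubits : Int) (buffer_qubits : Int) (inter_topology : String) (out : Int) : Prop := out = idle_reserved_qubits_alt num_cores communication_qubits buffer_qubits inter_topology
instance (num_cores : Int) (communication_qubits : Int) (buffer_qubits : Int) (inter_topology : String) (out : Int) : Decidable (Spec_idle_reserved_qubits num_cores communication_qubits buffer_qubits inter_topology out) := by unfold Spec_idle_reserved_qubits; infer_instance

-- ===== CLAIM (what is proved, stated in full; the proofs are below) =====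
def Claim_equal_idle_reserved_qubits : Prop := ∀ (num_cores : Int) (communication_qubits : Int) (buffer_qubits : Int) (inter_topology : String), Dom_idle_reserved_qubits num_cores communication_qubits buffer_qubits inter_topology → Spec_idle_reserved_qubits num_cores communication_qubits buffer_qubits inter_topology (idle_reserved_qubits num_cores communication_qubits buffer_qubits inter_topology)

-- ===== LEMMAS AND PROOFS =====

-- length of sorted(set(l)) for duplicate-free l
theorem pvLenSortedSet (l : List Int) (h : l.Nodup) :
    ((PySem.List.sorted (PySem.Set.ofList l) (fun x => x) false).length : Int) = (l.length : Int) := by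
  rw [PySem.List.length_sorted, PySem.Set.ofList_eq_self_of_nodup l h]

-- a nonempty constant list of group counts gives zero total deficit
theorem pvConstSum (gl : List Int) (d slot : Int) (hne : gl ≠ []) (hall : ∀ g ∈ gl, g = d) :
    (gl.map (fun g => ((PySem.List.max? gl (fun x => x)).getD 0 - g) * slot)).sum = 0 := by
  obtain ⟨m, hm⟩ : ∃ m, PySem.List.max? gl (fun x => x) = some m := by
    cases hq : PySem.List.max? gl (fun x => x) with
    | none => exact absurd ((PySem.List.max?_eq_none_iff _ _).1 hq) hne
    | some m => exact ⟨m, rfl⟩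
  have hmd : m = d := hall m (PySem.List.max?_mem hm)
  rw [hm]
  apply List.sum_eq_zero
  intro x hx
  obtain ⟨g, hg, rfl⟩ := List.mem_map.1 hx
  rw [hall g hg, Option.getD_some, hmd, sub_self, zero_mul]

-- total deficit in terms of length and total degree
theorem pvSumDeficit (gl : List Int) (Gm s : Int) :
    (gl.map (fun g => (Gm - g) * s)).sum = (Gm * (gl.length : Int) - gl.sum) * s := by
  induction gl with
  | nil => simp
  | cons x xs ih =>
    simp only [List.map_cons, List.sum_cons, List.length_cons, ih]
    push_cast
    ring

-- the (total, running-max) pair fold splits into a sum and a running max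
theorem pvPairFold (f : Int → Int) (l : List Int) (a b : Int) :
    l.foldl (fun (p : Int × Int) x => (p.1 + f x, if f x > p.2 then f x else p.2)) (a, b)
      = (a + (l.map f).sum, (l.map f).foldl (fun m y => if y > m then y else m) b) := by
  induction l generalizing a b with
  | nil => simp
  | cons x xs ih =>
    simp only [List.foldl_cons, List.map_cons, List.sum_cons, ih]
    exact Prod.ext (by ring) rfl

-- running max from 0 over a nonempty list of nonnegatives = Python's max
theorem pvRunMax (gl : List Int) (hne : gl ≠ []) (hnn : ∀ g ∈ gl, 0 ≤ g) :
    gl.foldl (fun m y => if y > m then y else m) 0 = (PySem.List.max? gl (fun x => x)).getD 0 := by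
  obtain ⟨y, tl, rfl⟩ := List.exists_cons_of_ne_nil hne
  rw [PySem.List.max?_id_cons, Option.getD_some]
  have h0 : (fun (m y : Int) => if y > m then y else m) = fun m y => max m y := by
    funext m y
    rw [max_def]
    split_ifs <;> omega
  rw [h0, List.foldl_cons]
  have : max 0 y = y := max_eq_right (hnn y (by simp))
  rw [this]

-- ring (and unknown-topology) neighbour list: 2 distinct cores, 1 when nc = 2
theorem pvRingLen (nc c : Int) (_h2 : 2 ≤ nc) :
    ((PySem.List.sorted (PySem.Set.ofList
        ([PySem.Int.mod (c + 1) nc] ++ (if nc > 2 then [PySem.Int.mod (c - 1) nc] else [])))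
        (fun x => x) false).length : Int) = if nc > 2 then 2 else 1 := by
  by_cases h3 : nc > 2
  · have hne : PySem.Int.mod (c + 1) nc ≠ PySem.Int.mod (c - 1) nc := by
      intro he
      have e1 := PySem.Int.floordiv_mul_add_mod (c + 1) nc
      have e2 := PySem.Int.floordiv_mul_add_mod (c - 1) nc
      have hd : nc ∣ 2 := ⟨PySem.Int.floordiv (c + 1) nc - PySem.Int.floordiv (c - 1) nc, by
        have h := mul_sub nc (PySem.Int.floordiv (c + 1) nc) (PySem.Int.floordiv (c - 1) nc)
        rw [mul_comm nc (PySem.Int.floordiv (c + 1) nc), mul_comm nc (PySem.Int.floordiv (c - 1) nc)] at h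
        omega⟩
      have := Int.le_of_dvd (by norm_num) hd
      omega
    rw [if_pos h3, if_pos h3, pvLenSortedSet]
    · simp
    · simp [hne]
  · rw [if_neg h3, if_neg h3, pvLenSortedSet] <;> simp

-- linear neighbour list length
theorem pvLinLen (nc c : Int) :
    ((PySem.List.sorted (PySem.Set.ofList
        ((if c + 1 < nc then [c + 1] else []) ++ (if c - 1 ≥ 0 then [c - 1] else [])))
        (fun x => x) false).length : Int)
      = (if c + 1 < nc then 1 else 0) + (if c - 1 ≥ 0 then 1 else 0) := by
  rw [pvLenSortedSet]
  · split_ifs <;> simp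
  · split_ifs <;> (simp; try omega)

-- all_to_all neighbour list length: nc - 1 (a constant)
theorem pvAllLen (nc c : Int) (h2 : 2 ≤ nc) (hc : c ∈ PySem.List.pyRange 0 nc 1) :
    ((PySem.List.sorted (PySem.Set.ofList
        ((PySem.List.pyRange 0 nc 1).foldl (fun l c2 => if c2 ≠ c then l ++ [c2] else l) []))
        (fun x => x) false).length : Int) = nc - 1 := by
  have hfun : (fun (l : List Int) c2 => if c2 ≠ c then l ++ [c2] else l)
      = (fun (l : List Int) c2 => if (fun c2 => decide (c2 ≠ c)) c2 = true then l ++ [c2] else l) := by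
    funext l c2
    simp
  rw [hfun, PySem.List.foldl_append_if_eq_filter, List.nil_append]
  have hnd : ((PySem.List.pyRange 0 nc 1).filter (fun c2 => decide (c2 ≠ c))).Nodup :=
    (PySem.List.nodup_pyRange_one 0 nc).filter _
  rw [pvLenSortedSet _ hnd]
  have herase : (PySem.List.pyRange 0 nc 1).filter (fun c2 => decide (c2 ≠ c))
      = (PySem.List.pyRange 0 nc 1).erase c := by
    rw [(PySem.List.nodup_pyRange_one 0 nc).erase_eq_filter]
    apply List.filter_congr
    intro x _
    by_cases hxc : x = c
    · subst hxc
      simp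
    · simp [hxc, bne]
  rw [herase]
  rw [List.length_erase_of_mem hc, PySem.List.length_pyRange_one]
  have h0 : ((nc - 0).toNat) = nc.toNat := by omega
  rw [h0]
  omega

-- grid neighbour list length: the four guards give four distinct cores (side ≥ 2)
theorem pvGridLen (nc c side : Int) (hs : 2 ≤ side) :
    ((PySem.List.sorted (PySem.Set.ofList
        ((if PySem.Int.mod c side + 1 < side ∧ c + 1 < nc then [c + 1] else []) ++
         (if PySem.Int.mod c side > 0 ∧ c - 1 ≥ 0 then [c - 1] else []) ++
         (if c + side < nc then [c + side] else []) ++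
         (if c - side ≥ 0 then [c - side] else [])))
        (fun x => x) false).length : Int)
      = (if PySem.Int.mod c side + 1 < side ∧ c + 1 < nc then 1 else 0)
      + (if PySem.Int.mod c side > 0 ∧ c - 1 ≥ 0 then 1 else 0)
      + (if c + side < nc then 1 else 0)
      + (if c - side ≥ 0 then 1 else 0) := by
  rw [pvLenSortedSet]
  · split_ifs <;> simp
  · split_ifs <;> simp <;> omega

-- the grid side length is at least 2 once there are two cores
theorem pvSideGe (nc : Int) (h2 : 2 ≤ nc) : 2 ≤ (((nc - 1).toNat.sqrt : Nat) : Int) + 1 := by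
  have h1 : 1 ≤ (nc - 1).toNat := by omega
  have : 1 ≤ (nc - 1).toNat.sqrt := by
    rw [Nat.le_sqrt]
    omega
  omega

-- c % side = 0 at c = 0 (side > 0)
theorem pvModZero (side : Int) (hs : 0 < side) : PySem.Int.mod 0 side = 0 := by
  rw [PySem.Int.mod_eq_emod_of_pos hs]
  simp


-- the Python max of a nonempty list equals a stated value d that bounds the list and occurs in it
theorem pvMaxEq (gl : List Int) (d : Int) (hne : gl ≠ []) (hub : ∀ g ∈ gl, g ≤ d) (hmem : d ∈ gl) :
    (PySem.List.max? gl (fun x => x)).getD 0 = d := by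
  obtain ⟨m, hm⟩ : ∃ m, PySem.List.max? gl (fun x => x) = some m := by
    cases hq : PySem.List.max? gl (fun x => x) with
    | none => exact absurd ((PySem.List.max?_eq_none_iff _ _).1 hq) hne
    | some m => exact ⟨m, rfl⟩
  have h1 : d ≤ m := PySem.List.max?_isMax hm d hmem
  have h3 := hub m (PySem.List.max?_mem hm)
  rw [hm, Option.getD_some]
  omega

-- branch-selection lemmas for A's per-core list builder
theorem pvRawA_ring (nc c : Int) : pvRawA nc "ring" c
    = [PySem.Int.mod (c + 1) nc] ++ (if nc > 2 then [PySem.Int.mod (c - 1) nc] else []) := by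
  simp [pvRawA]

theorem pvRawA_linear (nc c : Int) : pvRawA nc "linear" c
    = (if c + 1 < nc then [c + 1] else []) ++ (if c - 1 ≥ 0 then [c - 1] else []) := by
  simp [pvRawA]

theorem pvRawA_all (nc c : Int) : pvRawA nc "all_to_all" c
    = (PySem.List.pyRange 0 nc 1).foldl (fun l c2 => if c2 ≠ c then l ++ [c2] else l) [] := by
  simp [pvRawA]

theorem pvRawA_grid (nc c : Int) : pvRawA nc "grid" c
    = (if PySem.Int.mod c (((nc - 1).toNat.sqrt : Int) + 1) + 1 < ((nc - 1).toNat.sqrt : Int) + 1 ∧ c + 1 < nc then [c + 1] else []) ++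
      (if PySem.Int.mod c (((nc - 1).toNat.sqrt : Int) + 1) > 0 ∧ c - 1 ≥ 0 then [c - 1] else []) ++
      (if c + (((nc - 1).toNat.sqrt : Int) + 1) < nc then [c + (((nc - 1).toNat.sqrt : Int) + 1)] else []) ++
      (if c - (((nc - 1).toNat.sqrt : Int) + 1) ≥ 0 then [c - (((nc - 1).toNat.sqrt : Int) + 1)] else []) := by
  simp [pvRawA]

theorem pvRawA_else (nc c : Int) (inter : String) (h1 : inter ≠ "ring") (h2 : inter ≠ "linear")
    (h3 : inter ≠ "all_to_all") (h4 : inter ≠ "grid") : pvRawA nc inter c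
    = [PySem.Int.mod (c + 1) nc] ++ (if nc > 2 then [PySem.Int.mod (c - 1) nc] else []) := by
  simp [pvRawA, h1, h2, h3, h4]

theorem idle_spec_aux : ∀ (num_cores communication_qubits buffer_qubits : Int) (inter_topology : String),
    idle_reserved_qubits num_cores communication_qubits buffer_qubits inter_topology
      = idle_reserved_qubits_alt num_cores communication_qubits buffer_qubits inter_topology := by
  intro nc K B t
  by_cases h2lt : nc < 2
  · simp [idle_reserved_qubits, idle_reserved_qubits_alt, h2lt]
  · have h2 : 2 ≤ nc := by omega
    have hrne : PySem.List.pyRange 0 nc 1 ≠ [] := by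
      rw [PySem.List.pyRange_one_cons (by omega)]
      exact List.cons_ne_nil _ _
    simp only [idle_reserved_qubits, idle_reserved_qubits_alt, pvNumCommGroups, pvCoreGroupsFor,
      pvInterCoreNeighbors, pvGMax, if_neg h2lt]
    set inter := PySem.Str.lower (if t = "" then "ring" else t) with hintdef
    set slot := max 0 K + max 0 B with hslot
    set rng := PySem.List.pyRange 0 nc 1 with hrngdef
    by_cases hlin : inter = "linear"
    · -- LINEAR
      rw [if_pos hlin, hlin]
      have hcong : ((rng.map (fun c => pvRawA nc "linear" c)).map
            (fun n => PySem.List.sorted (PySem.Set.ofList n) (fun x => x) false)).map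
            (fun g => ((g.length : Nat) : Int))
          = rng.map (fun c => (if c + 1 < nc then (1 : Int) else 0) + (if c - 1 ≥ 0 then 1 else 0)) := by
        simp only [List.map_map]
        apply List.map_congr_left
        intro c hc
        simp only [Function.comp_def]
        rw [pvRawA_linear]
        exact pvLinLen nc c
      rw [hcong]
      by_cases h3 : 2 < nc
      · rw [if_pos h3]
        have hGm : (PySem.List.max? (rng.map (fun c => (if c + 1 < nc then (1 : Int) else 0) + (if c - 1 ≥ 0 then 1 else 0))) (fun x => x)).getD 0 = 2 := by
          apply pvMaxEq
          · simpa using hrne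
          · intro g hg
            obtain ⟨c, hc, rfl⟩ := List.mem_map.1 hg
            split_ifs <;> omega
          · refine List.mem_map.2 ⟨1, ?_, ?_⟩
            · rw [hrngdef]
              exact (PySem.List.mem_pyRange_one).2 ⟨by omega, by omega⟩
            · rw [if_pos (by omega), if_pos (by omega)]
              norm_num
        rw [hGm]
        have hdecomp : rng = 0 :: (PySem.List.pyRange 1 (nc - 1) 1 ++ [nc - 1]) := by
          rw [hrngdef, PySem.List.pyRange_one_cons (by omega : (0:Int) < nc)]
          rw [show (0:Int) + 1 = 1 from by norm_num]
          congr 1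
          have h := PySem.List.pyRange_one_succ_right (a := 1) (b := nc - 1) (by omega : (1:Int) ≤ nc - 1)
          rw [show nc - 1 + 1 = nc from by ring] at h
          exact h
        rw [hdecomp]
        simp only [List.map_map, Function.comp_def, List.map_cons, List.map_append, List.map_nil,
          List.sum_cons, List.sum_append, List.sum_nil]
        have hmid : ∀ x ∈ (PySem.List.pyRange 1 (nc - 1) 1).map
            (fun c => (2 - ((if c + 1 < nc then (1 : Int) else 0) + (if c - 1 ≥ 0 then 1 else 0))) * slot), x = 0 := by
          intro x hx
          obtain ⟨c, hc, rfl⟩ := List.mem_map.1 hx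
          have hcb := (PySem.List.mem_pyRange_one).1 hc
          have e : (if c + 1 < nc then (1 : Int) else 0) + (if c - 1 ≥ 0 then 1 else 0) = 2 := by split_ifs <;> omega
          rw [e]
          ring
        rw [List.sum_eq_zero hmid]
        split_ifs <;> omega
      · rw [if_neg h3]
        refine pvConstSum _ 1 _ ?_ ?_
        · simpa using hrne
        · intro g hg
          obtain ⟨c, hc, rfl⟩ := List.mem_map.1 hg
          rw [hrngdef] at hc
          have hcb := (PySem.List.mem_pyRange_one).1 hc
          split_ifs <;> omega
    · by_cases hgrid : inter = "grid"
      · -- GRID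
        rw [if_neg hlin, if_pos hgrid, hgrid]
        have hs2 : 2 ≤ (((nc - 1).toNat.sqrt : Int) + 1) := pvSideGe nc h2
        have hcong : ((rng.map (fun c => pvRawA nc "grid" c)).map
              (fun n => PySem.List.sorted (PySem.Set.ofList n) (fun x => x) false)).map
              (fun g => ((g.length : Nat) : Int))
            = rng.map (fun c => (if PySem.Int.mod c (((nc - 1).toNat.sqrt : Int) + 1) + 1 < (((nc - 1).toNat.sqrt : Int) + 1) ∧ c + 1 < nc then (1 : Int) else 0)
        + (if PySem.Int.mod c (((nc - 1).toNat.sqrt : Int) + 1) > 0 then 1 else 0)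
        + (if c + (((nc - 1).toNat.sqrt : Int) + 1) < nc then 1 else 0)
        + (if c - (((nc - 1).toNat.sqrt : Int) + 1) ≥ 0 then 1 else 0)) := by
          simp only [List.map_map]
          apply List.map_congr_left
          intro c hc
          simp only [Function.comp_def]
          rw [pvRawA_grid, pvGridLen nc c (((nc - 1).toNat.sqrt : Int) + 1) hs2]
          rw [hrngdef] at hc
          have hcb := (PySem.List.mem_pyRange_one).1 hc
          by_cases hc0 : c = 0
          · subst hc0
            rw [pvModZero (((nc - 1).toNat.sqrt : Int) + 1) (by omega)]
            norm_num
          · have h1 : (1:Int) ≤ c := by omega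
            simp [h1]
        rw [hcong]
        rw [pvPairFold (fun c => (if PySem.Int.mod c (((nc - 1).toNat.sqrt : Int) + 1) + 1 < (((nc - 1).toNat.sqrt : Int) + 1) ∧ c + 1 < nc then (1 : Int) else 0)
        + (if PySem.Int.mod c (((nc - 1).toNat.sqrt : Int) + 1) > 0 then 1 else 0)
        + (if c + (((nc - 1).toNat.sqrt : Int) + 1) < nc then 1 else 0)
        + (if c - (((nc - 1).toNat.sqrt : Int) + 1) ≥ 0 then 1 else 0)) rng 0 0]
        have hnn : ∀ g ∈ rng.map (fun c => (if PySem.Int.mod c (((nc - 1).toNat.sqrt : Int) + 1) + 1 < (((nc - 1).toNat.sqrt : Int) + 1) ∧ c + 1 < nc then (1 : Int) else 0)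
        + (if PySem.Int.mod c (((nc - 1).toNat.sqrt : Int) + 1) > 0 then 1 else 0)
        + (if c + (((nc - 1).toNat.sqrt : Int) + 1) < nc then 1 else 0)
        + (if c - (((nc - 1).toNat.sqrt : Int) + 1) ≥ 0 then 1 else 0)), 0 ≤ g := by
          intro g hg
          obtain ⟨c, hc, rfl⟩ := List.mem_map.1 hg
          split_ifs <;> norm_num
        rw [pvRunMax _ (by simpa using hrne) hnn]
        rw [pvSumDeficit]
        have hlen : (((rng.map (fun c => (if PySem.Int.mod c (((nc - 1).toNat.sqrt : Int) + 1) + 1 < (((nc - 1).toNat.sqrt : Int) + 1) ∧ c + 1 < nc then (1 : Int) else 0)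
        + (if PySem.Int.mod c (((nc - 1).toNat.sqrt : Int) + 1) > 0 then 1 else 0)
        + (if c + (((nc - 1).toNat.sqrt : Int) + 1) < nc then 1 else 0)
        + (if c - (((nc - 1).toNat.sqrt : Int) + 1) ≥ 0 then 1 else 0))).length : Nat) : Int) = nc := by
          rw [List.length_map, hrngdef, PySem.List.length_pyRange_one]
          omega
        rw [hlen]
        ring
      · rw [if_neg hlin, if_neg hgrid]
        by_cases hring : inter = "ring"
        · rw [hring]
          refine pvConstSum _ (if nc > 2 then 2 else 1) _ ?_ ?_
          · simpa using hrne
          · intro g hg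
            simp only [List.mem_map] at hg
            obtain ⟨_, ⟨_, ⟨c, hc, rfl⟩, rfl⟩, rfl⟩ := hg
            rw [pvRawA_ring]
            exact pvRingLen nc c h2
        · by_cases hall : inter = "all_to_all"
          · rw [hall]
            refine pvConstSum _ (nc - 1) _ ?_ ?_
            · simpa using hrne
            · intro g hg
              simp only [List.mem_map] at hg
              obtain ⟨_, ⟨_, ⟨c, hc, rfl⟩, rfl⟩, rfl⟩ := hg
              rw [pvRawA_all]
              exact pvAllLen nc c h2 hc
          · refine pvConstSum _ (if nc > 2 then 2 else 1) _ ?_ ?_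
            · simpa using hrne
            · intro g hg
              simp only [List.mem_map] at hg
              obtain ⟨_, ⟨_, ⟨c, hc, rfl⟩, rfl⟩, rfl⟩ := hg
              rw [pvRawA_else nc c inter hring hlin hall hgrid]
              exact pvRingLen nc c h2

-- ===== VERDICT (by name: the statement is the Claim_ definition above) =====
theorem idle_reserved_qubits_spec : Claim_equal_idle_reserved_qubits := by
  intro nc K B t _
  unfold Spec_idle_reserved_qubits
  exact idle_spec_aux nc K B t
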